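-- pv_equiv track=rewrite | github.com/jasmaabox/icpfc2024 | encoding.py | encode_integer
-- ===== SOURCE A (Python) =====
-- def encode_integer(value: int) -> str:
--     v = value
--     digits = []
--     while v >= 94:
--         digits.append(v % 94)
--         v = v // 94
--     digits.append(v)
--     encoded_content = "".join([chr(d + ord("!")) for d in digits[::-1]])
--     return f"I{encoded_content}"
-- ===== SOURCE B (Python) =====
-- def encode_integer(value: int) -> str:
--     def enc(v):
--         if v < 94:
--             return chr(v + ord("!"))
--         return enc(v // 94) + chr(v % 94 + ord("!"))
--     return "I" + enc(value)
-- ===== Notes on version B (the rewrite author's own statement) =====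
-- stated objective: simpler
-- what changed: Replaces the while-loop that appends digits to a list and then reverses/joins them with a recursive helper that emits the digits most-significant-first directly, so no list, reversal or join is needed.
import Mathlib
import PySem

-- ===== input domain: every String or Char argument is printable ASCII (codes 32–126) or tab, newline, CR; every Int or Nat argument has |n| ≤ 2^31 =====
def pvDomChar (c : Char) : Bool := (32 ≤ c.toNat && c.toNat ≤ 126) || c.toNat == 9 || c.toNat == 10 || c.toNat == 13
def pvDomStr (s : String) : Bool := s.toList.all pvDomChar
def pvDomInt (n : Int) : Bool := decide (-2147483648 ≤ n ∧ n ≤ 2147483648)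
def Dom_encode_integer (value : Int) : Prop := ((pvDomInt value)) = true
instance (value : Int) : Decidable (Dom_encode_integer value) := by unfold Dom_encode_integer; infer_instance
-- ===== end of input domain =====

-- B replaces A's append-then-reverse digit loop with a recursive helper emitting digits
-- most-significant-first; same output, simpler decomposition (no list/reversal/join).


-- chr(n): exact for 0 ≤ n < 0x110000; Python raises for negative n — excluded by Pre_.
def pyChr (n : Int) : Char := Char.ofNat n.toNat

-- ===== PORT A =====
-- the while-loop: returns (final v, digits)
def encLoopA (v : Int) (digits : List Int) : Int × List Int :=
  if 94 ≤ v then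
    encLoopA (PySem.Int.floordiv v 94) (digits ++ [PySem.Int.mod v 94])
  else (v, digits)
termination_by v.toNat
decreasing_by
  have h1 := PySem.Int.floordiv_mul_add_mod v 94
  have h2 := PySem.Int.mod_nonneg v (b := 94) (by omega)
  have h3 := PySem.Int.mod_lt v (b := 94) (by omega)
  omega

def encode_integer (value : Int) : String :=
  let r := encLoopA value []
  let digits := r.2 ++ [r.1]
  let encoded := ((PySem.List.slice? digits none none (-1)).getD []).map (fun d => pyChr (d + 33))
  String.ofList ('I' :: encoded)

-- ===== PORT B =====
def encRecB (v : Int) : List Char :=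
  if h : v < 94 then [pyChr (v + 33)]
  else encRecB (PySem.Int.floordiv v 94) ++ [pyChr (PySem.Int.mod v 94 + 33)]
termination_by v.toNat
decreasing_by
  have h1 := PySem.Int.floordiv_mul_add_mod v 94
  have h2 := PySem.Int.mod_nonneg v (b := 94) (by omega)
  have h3 := PySem.Int.mod_lt v (b := 94) (by omega)
  omega

def encode_integer_alt (value : Int) : String := String.ofList ('I' :: encRecB value)

-- ===== PRECONDITION & SPEC =====
-- Pre_ excludes value < -33, exactly where Python's chr(v + 33) raises ValueError (in both A and B).
def Pre_encode_integer (value : Int) : Prop := -33 ≤ value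
instance (value : Int) : Decidable (Pre_encode_integer value) := by unfold Pre_encode_integer; infer_instance
def pvWitness_encode_integer : Int := (1337)

def Spec_encode_integer (value : Int) (out : String) : Prop := out = encode_integer_alt value
instance (value : Int) (out : String) : Decidable (Spec_encode_integer value out) := by unfold Spec_encode_integer; infer_instance

-- ===== CLAIM (what is proved, stated in full; the proofs are below) =====
def Claim_equal_encode_integer : Prop := ∀ (value : Int), Dom_encode_integer value → Pre_encode_integer value → Spec_encode_integer value (encode_integer value)

-- ===== LEMMAS AND PROOFS =====
-- the accumulator of A's loop is only ever appended to
theorem encLoopA_acc (v : Int) (ds : List Int) :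
    encLoopA v ds = ((encLoopA v []).1, ds ++ (encLoopA v []).2) := by
  by_cases h : 94 ≤ v
  · have hq := encLoopA_acc (PySem.Int.floordiv v 94)
    conv_lhs => rw [encLoopA]
    conv_rhs => rw [encLoopA]
    rw [if_pos h, if_pos h,
      hq (ds ++ [PySem.Int.mod v 94]), hq ([] ++ [PySem.Int.mod v 94])]
    simp
  · conv_lhs => rw [encLoopA]
    conv_rhs => rw [encLoopA]
    rw [if_neg h, if_neg h]
    simp
termination_by v.toNat
decreasing_by
  have h1 := PySem.Int.floordiv_mul_add_mod v 94
  have h2 := PySem.Int.mod_nonneg v (b := 94) (by omega)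
  have h3 := PySem.Int.mod_lt v (b := 94) (by omega)
  omega

-- B's recursion produces exactly A's reversed digit list, mapped through chr(·+33)
theorem encRecB_eq_digits (v : Int) :
    encRecB v = (((encLoopA v []).2 ++ [(encLoopA v []).1]).reverse).map (fun d => pyChr (d + 33)) := by
  fun_induction encRecB v with
  | case1 v h =>
    rw [encLoopA, if_neg (show ¬94 ≤ v by omega)]
    simp
  | case2 v h ih =>
    rw [encLoopA, if_pos (show 94 ≤ v by omega), encLoopA_acc]
    simp only [List.nil_append, List.reverse_append, List.reverse_cons, List.reverse_nil,
      List.nil_append, List.map_append, List.map_cons, List.map_nil]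
    rw [ih]
    simp

theorem encode_integer_spec : Claim_equal_encode_integer := by
  intro value _ _
  show encode_integer value = encode_integer_alt value
  simp only [encode_integer, encode_integer_alt, PySem.List.slice?_none_none_neg_one,
    Option.getD_some, encRecB_eq_digits]
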